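-- pv_equiv track=rewrite | github.com/Hedicx2020/gh_wx | utils/stock_kline.py | _aggregate_messages_by_date
-- ===== SOURCE A (Python) =====
-- from typing import List, Dict, Tuple, Optional
--
-- def _aggregate_messages_by_date(messages: List[Dict]) -> Dict[str, List[Dict]]:
--     """
--     按日期聚合聊天记录（已去重）
--     """
--     msg_by_date = {}
--     seen = set()
--
--     for msg in messages:
--         time_str = msg.get('time', '')
--         if not time_str:
--             continue
--
--         # 提取日期部分
--         date = time_str.split(' ')[0]
--
--         # 去重: 同一日+聊天对象+发送者+内容
--         dedup_key = f"{date}|{msg.get('chat_name', '')}|{msg.get('sender', '')}|{msg.get('content', '')}"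
--         if dedup_key in seen:
--             continue
--         seen.add(dedup_key)
--
--         if date not in msg_by_date:
--             msg_by_date[date] = []
--         msg_by_date[date].append(msg)
--
--     return msg_by_date
-- ===== SOURCE B (Python) =====
-- from typing import List, Dict
--
-- def _aggregate_messages_by_date(messages: List[Dict]) -> Dict[str, List[Dict]]:
--     """
--     按日期聚合聊天记录（已去重）— dedup-first, then group.
--     """
--     # Phase 1: keep only the first message for each composite key, in order.
--     firsts = {}
--     for msg in messages:
--         time_str = msg.get('time', '')
--         if not time_str:
--             continue
--         date = time_str.split(' ')[0]
--         key = f"{date}|{msg.get('chat_name', '')}|{msg.get('sender', '')}|{msg.get('content', '')}"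
--         if key not in firsts:
--             firsts[key] = (date, msg)
--     # Phase 2: group the surviving messages by date.
--     result = {}
--     for date, msg in firsts.values():
--         result.setdefault(date, []).append(msg)
--     return result
-- ===== Notes on version B (the rewrite author's own statement) =====
-- stated objective: alternative
-- what changed: Replaces A's single fused pass (grouping dict + seen set updated together) with two separate phases: a first-occurrence index keyed by the composite dedup key (no separate seen set), then a grouping pass over its values.
import Mathlib
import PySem

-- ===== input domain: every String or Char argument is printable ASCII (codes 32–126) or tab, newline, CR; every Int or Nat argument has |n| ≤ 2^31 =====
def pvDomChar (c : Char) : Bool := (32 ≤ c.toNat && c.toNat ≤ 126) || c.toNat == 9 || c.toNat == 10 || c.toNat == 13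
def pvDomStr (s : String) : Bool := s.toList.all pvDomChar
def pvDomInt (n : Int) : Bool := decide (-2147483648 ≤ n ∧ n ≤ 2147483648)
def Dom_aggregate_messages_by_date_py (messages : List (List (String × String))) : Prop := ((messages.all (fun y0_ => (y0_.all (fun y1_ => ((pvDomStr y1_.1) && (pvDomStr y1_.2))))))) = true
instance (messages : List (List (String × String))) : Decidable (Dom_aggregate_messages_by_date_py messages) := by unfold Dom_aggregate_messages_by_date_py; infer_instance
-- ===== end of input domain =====

-- B replaces A's single fused dedup+group pass with two phases (a first-occurrence index
-- keyed by the composite dedup key, then a grouping pass over its values); objective: alternative.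

-- shared helpers: msg.get(k, ''), time_str.split(' ')[0], and the f-string dedup key
def pvGet (msg : List (String × String)) (k : String) : String :=
  (PySem.Dict.mk msg).getD k ""

def pvDate (t : String) : String :=
  ((PySem.Str.split? t " ").getD []).headD ""   -- t.split(' ')[0]; split? is some since sep ≠ ""

def pvKey (date : String) (msg : List (String × String)) : String :=
  date ++ "|" ++ pvGet msg "chat_name" ++ "|" ++ pvGet msg "sender" ++ "|" ++ pvGet msg "content"

-- ===== PORT A =====
-- one fused loop: state = (msg_by_date, seen)
def pvStepA (st : PySem.Dict String (List (List (String × String))) × PySem.Set String)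
    (msg : List (String × String)) :
    PySem.Dict String (List (List (String × String))) × PySem.Set String :=
  let t := pvGet msg "time"
  if t = "" then st else
  let date := pvDate t
  let key := pvKey date msg
  if PySem.Set.contains st.2 key then st else
  let seen := PySem.Set.add st.2 key
  let d := if st.1.contains date then st.1 else st.1.insert date []
  (d.modify date [] (fun l => l ++ [msg]), seen)  -- msg_by_date[date].append(msg)

def aggregate_messages_by_date_py (messages : List (List (String × String))) : List (String × List (List (String × String))) :=
  (messages.foldl pvStepA (PySem.Dict.empty, PySem.Set.empty)).1.items

-- ===== PORT B =====
-- phase 1: first occurrence per composite key (no separate seen set)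
def pvStepIndex (f : PySem.Dict String (String × List (String × String)))
    (msg : List (String × String)) : PySem.Dict String (String × List (String × String)) :=
  let t := pvGet msg "time"
  if t = "" then f else
  let date := pvDate t
  let key := pvKey date msg
  if f.contains key then f else f.insert key (date, msg)

-- phase 2: result.setdefault(date, []).append(msg)
def pvGroup (r : PySem.Dict String (List (List (String × String))))
    (p : String × List (String × String)) : PySem.Dict String (List (List (String × String))) :=
  r.modify p.1 [] (fun l => l ++ [p.2])

def aggregate_messages_by_date_py_alt (messages : List (List (String × String))) : List (String × List (List (String × String))) :=
  let firsts := messages.foldl pvStepIndex PySem.Dict.empty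
  (firsts.values.foldl pvGroup PySem.Dict.empty).items

-- ===== PRECONDITION & SPEC =====
def Spec_aggregate_messages_by_date_py (messages : List (List (String × String))) (out : List (String × List (List (String × String)))) : Prop := out = aggregate_messages_by_date_py_alt messages
instance (messages : List (List (String × String))) (out : List (String × List (List (String × String)))) : Decidable (Spec_aggregate_messages_by_date_py messages out) := by unfold Spec_aggregate_messages_by_date_py; infer_instance

-- ===== CLAIM (what is proved, stated in full; the proofs are below) =====
def Claim_equal_aggregate_messages_by_date_py : Prop := ∀ (messages : List (List (String × String))), Dom_aggregate_messages_by_date_py messages → Spec_aggregate_messages_by_date_py messages (aggregate_messages_by_date_py messages)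

-- ===== LEMMAS AND PROOFS =====

-- ensuring the key exists and then appending is one bare modify
theorem pv_ensure_modify (d : PySem.Dict String (List (List (String × String))))
    (date : String) (f : List (List (String × String)) → List (List (String × String))) :
    (if d.contains date then d else d.insert date []).modify date [] f = d.modify date [] f := by
  cases h : d.contains date
  · simp only [Bool.false_eq_true, reduceIte]
    simp only [PySem.Dict.modify, PySem.Dict.getD_insert_self, PySem.Dict.insert_insert_self,
      PySem.Dict.getD_of_not_contains d [] h]
  · simp

-- membership in A's seen list agrees with membership among B's index keys
theorem pv_contains_keys (f : PySem.Dict String (String × List (String × String))) (key : String) :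
    PySem.Set.contains (f.keys) key = f.contains key := by
  rw [PySem.Dict.contains_eq_decide_mem_keys]
  simp [PySem.Set.contains]

-- step lemma: one message moves both loops between matching states
theorem pv_step (firsts : PySem.Dict String (String × List (String × String)))
    (m : List (String × String)) :
    pvStepA (firsts.values.foldl pvGroup PySem.Dict.empty, firsts.keys) m
      = ((pvStepIndex firsts m).values.foldl pvGroup PySem.Dict.empty,
         (pvStepIndex firsts m).keys) := by
  unfold pvStepA pvStepIndex
  by_cases ht : pvGet m "time" = ""
  · simp [ht]
  · simp only [ht, reduceIte]
    rw [pv_contains_keys]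
    cases hc : firsts.contains (pvKey (pvDate (pvGet m "time")) m)
    · simp only [Bool.false_eq_true, reduceIte]
      have hkeys := PySem.Dict.keys_insert_of_not_contains firsts
        (pvDate (pvGet m "time"), m) hc
      have hitems := PySem.Dict.items_insert_of_not_contains firsts
        (pvDate (pvGet m "time"), m) hc
      refine Prod.ext ?_ ?_
      · have hv : (firsts.insert (pvKey (pvDate (pvGet m "time")) m)
            (pvDate (pvGet m "time"), m)).values
            = firsts.values ++ [(pvDate (pvGet m "time"), m)] := by
          simp [PySem.Dict.values, hitems]
        show _ = (_ : PySem.Dict String (List (List (String × String))) × List String).1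
        rw [hv, List.foldl_append]
        simp only [List.foldl_cons, List.foldl_nil]
        exact pv_ensure_modify _ _ _
      · show PySem.Set.add firsts.keys _ = _
        rw [hkeys, PySem.Set.add, pv_contains_keys, hc]
        simp
    · simp

-- main invariant: A's fused loop, started in the state matching B's index, lands on
-- the grouping of B's final index values
theorem pv_main (msgs : List (List (String × String)))
    (firsts : PySem.Dict String (String × List (String × String))) :
    msgs.foldl pvStepA (firsts.values.foldl pvGroup PySem.Dict.empty, firsts.keys)
      = ((msgs.foldl pvStepIndex firsts).values.foldl pvGroup PySem.Dict.empty,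
         (msgs.foldl pvStepIndex firsts).keys) := by
  induction msgs generalizing firsts with
  | nil => rfl
  | cons m ms ih =>
    simp only [List.foldl_cons]
    rw [pv_step]
    exact ih (pvStepIndex firsts m)

-- ===== VERDICT (by name: the statement is the Claim_ definition above) =====
theorem aggregate_messages_by_date_py_spec : Claim_equal_aggregate_messages_by_date_py := by
  intro messages _
  show aggregate_messages_by_date_py messages = aggregate_messages_by_date_py_alt messages
  exact congrArg (fun st => st.1.items) (pv_main messages PySem.Dict.empty)
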